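-- pv_equiv track=rewrite | github.com/PK007788/Vyapaar_Sahayak | app/ai/command_engine.py | _is_finish_command
-- ===== SOURCE A (Python) =====
-- FINISH_PHRASES = {
--     "done", "ho gaya", "ho gya", "bas", "aur nahi", "aur nahin",
--     "itna kaafi hai", "itna kafi hai", "bus", "hogaya", "hogya",
--     "nahi", "nhi", "khatam", "theek hai", "thik hai",
-- }
--
-- def _is_finish_command(text: str) -> bool:
--     """Check if the user's text is a finish command."""
--     cleaned = text.strip().lower()
--     # Check exact match
--     if cleaned in FINISH_PHRASES:
--         return True
--     # Check if the text starts with or contains a finish phrase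
--     for phrase in FINISH_PHRASES:
--         if cleaned == phrase or cleaned.startswith(phrase + " "):
--             return True
--     return False
-- ===== SOURCE B (Python) =====
-- FINISH_PHRASES = {
--     "done", "ho gaya", "ho gya", "bas", "aur nahi", "aur nahin",
--     "itna kaafi hai", "itna kafi hai", "bus", "hogaya", "hogya",
--     "nahi", "nhi", "khatam", "theek hai", "thik hai",
-- }
--
-- def _is_finish_command(text: str) -> bool:
--     """Check if the user's text is a finish command."""
--     cleaned = text.strip().lower()
--     if cleaned in FINISH_PHRASES:
--         return True
--     # Scan the input once: a phrase followed by a space means the prefix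
--     # before some space character is exactly a finish phrase.
--     for i, ch in enumerate(cleaned):
--         if ch == " " and cleaned[:i] in FINISH_PHRASES:
--             return True
--     return False
-- ===== Notes on version B (the rewrite author's own statement) =====
-- stated objective: alternative
-- what changed: Instead of scanning every finish phrase and testing whether the cleaned text starts with that phrase followed by a space, B scans the cleaned text once and does a set lookup of the prefix before each space character (plus the exact-match lookup); B's slices make it no faster.
import Mathlib
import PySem

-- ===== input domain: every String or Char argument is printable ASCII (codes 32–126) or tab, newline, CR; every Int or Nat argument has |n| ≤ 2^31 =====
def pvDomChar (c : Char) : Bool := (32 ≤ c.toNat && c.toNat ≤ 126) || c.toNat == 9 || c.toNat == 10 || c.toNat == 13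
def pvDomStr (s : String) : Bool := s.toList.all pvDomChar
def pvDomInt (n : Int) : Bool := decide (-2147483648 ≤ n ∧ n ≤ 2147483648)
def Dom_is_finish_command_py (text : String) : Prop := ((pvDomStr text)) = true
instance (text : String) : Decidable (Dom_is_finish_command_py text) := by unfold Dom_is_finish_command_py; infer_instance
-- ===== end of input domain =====

-- B replaces A's scan of every phrase with `startswith` by a single pass over the
-- cleaned input that looks up the prefix before each space in the phrase set
-- (objective: alternative — same small cost, different traversal).

-- the module constant FINISH_PHRASES (a Python set, insertion order of the literal)
def pvFinishPhrases : PySem.Set String := PySem.Set.ofList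
  ["done", "ho gaya", "ho gya", "bas", "aur nahi", "aur nahin",
   "itna kaafi hai", "itna kafi hai", "bus", "hogaya", "hogya",
   "nahi", "nhi", "khatam", "theek hai", "thik hai"]

-- ===== PORT A =====
def is_finish_command_py (text : String) : Bool :=
  let cleaned := PySem.Str.lower (PySem.Str.strip text)
  if pvFinishPhrases.contains cleaned then true
  else pvFinishPhrases.any (fun phrase =>
    cleaned == phrase || PySem.Str.startswith cleaned (phrase ++ " "))

-- ===== PORT B =====
def is_finish_command_py_alt (text : String) : Bool :=
  let cleaned := PySem.Str.lower (PySem.Str.strip text)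
  if pvFinishPhrases.contains cleaned then true
  else (PySem.List.enumerate cleaned.toList).any (fun ic =>
    ic.2 == ' ' && pvFinishPhrases.contains (PySem.Str.slice cleaned none (some ic.1)))

-- ===== PRECONDITION & SPEC =====
def Spec_is_finish_command_py (text : String) (out : Bool) : Prop := out = is_finish_command_py_alt text
instance (text : String) (out : Bool) : Decidable (Spec_is_finish_command_py text out) := by unfold Spec_is_finish_command_py; infer_instance

-- ===== CLAIM (what is proved, stated in full; the proofs are below) =====
def Claim_equal_is_finish_command_py : Prop := ∀ (text : String), Dom_is_finish_command_py text → Spec_is_finish_command_py text (is_finish_command_py text)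

-- ===== LEMMAS AND PROOFS =====

-- "p followed by a space is a prefix of l" ↔ "some position k of l holds a space and l.take k = p"
lemma pv_prefix_space_iff (p l : List Char) :
    p ++ [' '] <+: l ↔ ∃ k, ∃ _ : k < l.length, l[k] = ' ' ∧ l.take k = p := by
  constructor
  · rintro ⟨t, ht⟩
    subst ht
    refine ⟨p.length, by simp, ?_, ?_⟩
    · simp
    · simpa using List.take_left (l₁ := p) (l₂ := [' '] ++ t)
  · rintro ⟨k, hk, hsp, htake⟩
    subst htake
    have h1 : l.take k ++ [' '] = l.take (k + 1) := by
      rw [List.take_add_one]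
      have : l[k]? = some ' ' := by rw [List.getElem?_eq_getElem hk, hsp]
      simp [this]
    rw [h1]
    exact List.take_prefix _ _

-- A's per-phrase loop equals B's per-position loop, once the exact-match branch failed
lemma pv_loop_eq (L : List String) (c : String) (hc : L.contains c = false) :
    (L.any fun p => c == p || PySem.Str.startswith c (p ++ " ")) =
    ((PySem.List.enumerate c.toList).any fun ic =>
      ic.2 == ' ' && L.contains (PySem.Str.slice c none (some ic.1))) := by
  have hcm : c ∉ L := by simpa using hc
  rw [Bool.eq_iff_iff]
  simp only [List.any_eq_true, Bool.or_eq_true, Bool.and_eq_true, beq_iff_eq,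
    PySem.Str.startswith_eq, PySem.Chars.startswith_iff, String.toList_append]
  constructor
  · rintro ⟨p, hpL, hp⟩
    rcases hp with hp | hp
    · exact absurd (hp ▸ hpL) hcm
    · have : (" " : String).toList = [' '] := rfl
      rw [this] at hp
      rcases (pv_prefix_space_iff p.toList c.toList).mp hp with ⟨k, hk, hsp, htake⟩
      refine ⟨((k : Int), c.toList[k]), ?_, by simpa using hsp, ?_⟩
      · exact (PySem.List.mem_enumerate_iff _ _ _).mpr ⟨k, hk, by simp⟩
      · have hsl : (PySem.Str.slice c none (some (k : Int))).toList = p.toList := by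
          rw [PySem.Str.toList_slice, PySem.Chars.slice_eq_listSlice,
            PySem.List.slice_to_natCast, htake]
        rw [List.contains_eq_mem]
        simpa [String.toList_inj.mp hsl] using hpL
  · rintro ⟨ic, hmem, hsp, hcon⟩
    rcases (PySem.List.mem_enumerate_iff _ _ _).mp hmem with ⟨k, hk, hic⟩
    subst hic
    simp only at hsp hcon
    have hsl : (PySem.Str.slice c none (some ((0 : Int) + (k : Nat)))).toList = c.toList.take k := by
      rw [PySem.Str.toList_slice, PySem.Chars.slice_eq_listSlice]
      have : ((0 : Int) + (k : Nat)) = ((k : Nat) : Int) := by omega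
      rw [this, PySem.List.slice_to_natCast]
    refine ⟨PySem.Str.slice c none (some ((0 : Int) + (k : Nat))), ?_, Or.inr ?_⟩
    · rw [List.contains_eq_mem] at hcon; simpa using hcon
    · have : (" " : String).toList = [' '] := rfl
      rw [this, hsl]
      exact (pv_prefix_space_iff _ _).mpr ⟨k, hk, hsp, rfl⟩

-- ===== VERDICT (by name: the statement is the Claim_ definition above) =====
theorem is_finish_command_py_spec : Claim_equal_is_finish_command_py := by
  intro text _
  unfold Spec_is_finish_command_py is_finish_command_py is_finish_command_py_alt
  set c := PySem.Str.lower (PySem.Str.strip text) with hc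
  generalize pvFinishPhrases = L
  by_cases hm : c ∈ L
  · simp [PySem.Set.contains, List.contains_eq_mem, hm]
  · have h' : L.contains c = false := by
      simp [PySem.Set.contains, List.contains_eq_mem, hm]
    simp only [h', Bool.false_eq_true, if_false]
    exact pv_loop_eq L c h'
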